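-- pv_equiv track=rewrite | github.com/stellarlib/centaurus_old | stellarlib/vector/vector_tools.py | get_corner_sequences
-- ===== SOURCE A (Python) =====
-- def get_corner_sequences(names):
--
--     corners = []
--
--     l = len(names)
--     for i in range(l):
--
--         corners.append(tuple(names[:3]))
--         front = names.pop(0)
--         names.append(front)
--
--     return corners
-- ===== SOURCE B (Python) =====
-- def get_corner_sequences(names):
--     # Sliding fixed-width window over a once-padded copy; does not mutate names.
--     w = min(3, len(names))
--     ext = names + names[:2]
--     return [tuple(ext[i:i + w]) for i in range(len(names))]
-- ===== Notes on version B (the rewrite author's own statement) =====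
-- stated objective: faster
-- what changed: Instead of rotating the list in place l times (pop(0)+append, each O(l)) and slicing each rotation, B pads the list once with its first two elements and slides a fixed min(3,l)-width window over it; B also does not mutate names (A mutates it during the loop but restores it).
import Mathlib
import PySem

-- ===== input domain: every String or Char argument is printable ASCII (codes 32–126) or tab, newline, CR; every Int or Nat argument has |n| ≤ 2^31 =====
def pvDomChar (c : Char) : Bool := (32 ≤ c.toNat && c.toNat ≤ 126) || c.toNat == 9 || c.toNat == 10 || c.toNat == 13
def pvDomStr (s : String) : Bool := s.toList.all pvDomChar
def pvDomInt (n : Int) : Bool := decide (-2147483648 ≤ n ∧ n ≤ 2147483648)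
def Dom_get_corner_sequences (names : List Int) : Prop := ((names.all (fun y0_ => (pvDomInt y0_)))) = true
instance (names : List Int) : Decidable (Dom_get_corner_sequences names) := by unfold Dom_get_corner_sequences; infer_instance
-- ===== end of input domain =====

-- B replaces A's l in-place rotations (each O(l)) by one O(l) sliding window over a once-padded
-- copy of the list; equivalence is about the RETURN value (A mutates `names` during the loop but
-- restores it; B never mutates it).

-- ===== PORT A =====
-- literal port of A: loop i in range(l): corners.append(tuple(names[:3])); front = names.pop(0); names.append(front)
-- state = (corners, names); the pop(0)-on-empty IndexError branch is unreachable (the loop runs l > 0 times only when names is nonempty)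
def get_corner_sequences (names : List Int) : List (List Int) :=
  let l : Int := names.length
  ((PySem.List.pyRange 0 l 1).foldl
    (fun (st : List (List Int) × List Int) _ =>
      let corners := st.1 ++ [PySem.List.slice st.2 none (some 3)]
      match st.2 with
      | [] => (corners, [])
      | front :: rest => (corners, rest ++ [front]))
    ([], names)).1

-- ===== PORT B =====
-- literal port of Source B: w = min(3, len(names)); ext = names + names[:2]; [tuple(ext[i:i+w]) for i in range(len(names))]
def get_corner_sequences_alt (names : List Int) : List (List Int) :=
  let w : Nat := min 3 names.length
  let ext : List Int := names ++ PySem.List.slice names none (some 2)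
  (List.range names.length).map (fun (i : Nat) => PySem.List.slice ext (some (i : Int)) (some ((i : Int) + (w : Int))))

-- ===== PRECONDITION & SPEC =====
def Spec_get_corner_sequences (names : List Int) (out : List (List Int)) : Prop := out = get_corner_sequences_alt names
instance (names : List Int) (out : List (List Int)) : Decidable (Spec_get_corner_sequences names out) := by unfold Spec_get_corner_sequences; infer_instance

-- ===== CLAIM (what is proved, stated in full; the proofs are below) =====
def Claim_equal_get_corner_sequences : Prop := ∀ (names : List Int), Dom_get_corner_sequences names → Spec_get_corner_sequences names (get_corner_sequences names)

-- ===== LEMMAS AND PROOFS =====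

-- A's loop invariant
theorem pvLoopA (names : List Int) (n : Nat) :
    ((PySem.List.pyRange 0 (n : Int) 1).foldl
      (fun (st : List (List Int) × List Int) _ =>
        let corners := st.1 ++ [PySem.List.slice st.2 none (some 3)]
        match st.2 with
        | [] => (corners, [])
        | front :: rest => (corners, rest ++ [front]))
      ([], names))
    = ((List.range n).map (fun i => (names.rotate i).take 3), names.rotate n) := by
  induction n with
  | zero => simp [PySem.List.pyRange_one_eq_nil]
  | succ n ih =>
    have hr : PySem.List.pyRange 0 ((n : Int) + 1) 1 = PySem.List.pyRange 0 (n : Int) 1 ++ [(n : Int)] :=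
      PySem.List.pyRange_one_succ_right (by positivity)
    have hcast : ((n + 1 : Nat) : Int) = (n : Int) + 1 := by push_cast; ring
    rw [hcast, hr, List.foldl_append, ih, List.foldl_cons, List.foldl_nil]
    rcases hrot : names.rotate n with _ | ⟨a, t⟩
    · have hnil : names = [] := by
        have h := congrArg List.length hrot
        simp at h
        exact h
      subst hnil
      simp [PySem.List.slice, List.replicate_succ']
    · have hr1 : names.rotate (n + 1) = t ++ [a] := by
        rw [← List.rotate_rotate, hrot]
        simp
      simp only [hrot, List.range_succ, List.map_append, List.map_cons, List.map_nil, hr1]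
      simp [pysem]

theorem pvA_eq (names : List Int) :
    get_corner_sequences names = (List.range names.length).map (fun i => (names.rotate i).take 3) := by
  unfold get_corner_sequences
  dsimp only
  rw [pvLoopA names names.length]

-- B's window at i equals the first 3 of the i-th rotation
theorem pvWindow (names : List Int) (i : Nat) (hi : i < names.length) :
    ((names ++ PySem.List.slice names none (some 2)).drop i).take (min 3 names.length)
    = (names.rotate i).take 3 := by
  have h2 : PySem.List.slice names none (some ((2 : Nat) : Int)) = names.take 2 :=
    PySem.List.slice_to_natCast names 2
  rw [show ((2:Nat):Int) = (2:Int) from rfl] at h2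
  rw [h2, List.rotate_eq_drop_append_take (le_of_lt hi),
      List.drop_append_of_le_length (le_of_lt hi), List.take_append, List.take_append,
      List.take_take, List.take_take]
  have hld : (names.drop i).length = names.length - i := List.length_drop ..
  by_cases h3 : 3 ≤ names.length
  · have hw : min 3 names.length = 3 := by omega
    rw [hw, hld]
    congr 1
    congr 1
    omega
  · have h3 : names.length < 3 := by omega
    have hw : min 3 names.length = names.length := by omega
    rw [hw]
    rw [hld]
    congr 1
    · have hle1 : (names.drop i).length ≤ names.length := by rw [hld]; omega
      have hle2 : (names.drop i).length ≤ 3 := by rw [hld]; omega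
      exact (List.take_of_length_le hle1).trans (List.take_of_length_le hle2).symm
    · congr 1
      omega

theorem pvB_eq (names : List Int) :
    get_corner_sequences_alt names = (List.range names.length).map (fun i => (names.rotate i).take 3) := by
  unfold get_corner_sequences_alt
  dsimp only
  refine List.map_congr_left (fun i hi => ?_)
  have hi' : i < names.length := List.mem_range.mp hi
  rw [PySem.List.slice_natCast_add, pvWindow names i hi']

-- ===== VERDICT (by name: the statement is the Claim_ definition above) =====
theorem get_corner_sequences_spec : Claim_equal_get_corner_sequences := by
  intro names _
  unfold Spec_get_corner_sequences
  rw [pvA_eq, pvB_eq]
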